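-- pv_equiv track=rewrite | github.com/m2a0n0i2h/ai-research-partner | src/research/synthesiser.py | _parse_synthesis
-- ===== SOURCE A (Python) =====
-- def _parse_synthesis(response: str) -> dict:
--     '''Parse the structured synthesis response.'''
--     result = {
--         'synthesis': '',
--         'contradictions': 'None identified.',
--         'gaps': '',
--         'confidence': 'MODERATE',
--         'follow_up_question': ''
--     }
--
--     sections = {
--         'SYNTHESIS:': 'synthesis',
--         'CONTRADICTIONS:': 'contradictions',
--         'GAPS:': 'gaps',
--         'CONFIDENCE:': 'confidence',
--         'FOLLOW_UP_QUESTION:': 'follow_up_question'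
--     }
--
--     current_section = None
--     current_content = []
--
--     for line in response.split('\n'):
--         matched = False
--         for header, key in sections.items():
--             if line.strip().startswith(header):
--                 if current_section:
--                     result[current_section] = '\n'.join(current_content).strip()
--                 current_section = key
--                 remainder = line.strip()[len(header):].strip()
--                 current_content = [remainder] if remainder else []
--                 matched = True
--                 break
--         if not matched and current_section:
--             current_content.append(line)
--
--     if current_section:
--         result[current_section] = '\n'.join(current_content).strip()
--
--     return result
-- ===== SOURCE B (Python) =====
-- def _parse_synthesis(response: str) -> dict:
--     '''Parse the structured synthesis response (reverse-scan block grouping).'''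
--     result = {
--         'synthesis': '',
--         'contradictions': 'None identified.',
--         'gaps': '',
--         'confidence': 'MODERATE',
--         'follow_up_question': ''
--     }
--
--     headers = [
--         ('SYNTHESIS:', 'synthesis'),
--         ('CONTRADICTIONS:', 'contradictions'),
--         ('GAPS:', 'gaps'),
--         ('CONFIDENCE:', 'confidence'),
--         ('FOLLOW_UP_QUESTION:', 'follow_up_question')
--     ]
--
--     blocks = []   # collected back-to-front: (key, content lines)
--     tail = []     # lines after the current position up to the next header
--     for line in reversed(response.split('\n')):
--         stripped = line.strip()
--         for header, key in headers:
--             if stripped.startswith(header):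
--                 remainder = stripped[len(header):].strip()
--                 blocks.append((key, ([remainder] if remainder else []) + tail))
--                 tail = []
--                 break
--         else:
--             tail = [line] + tail
--
--     for key, content in reversed(blocks):
--         result[key] = '\n'.join(content).strip()
--
--     return result
-- ===== Notes on version B (the rewrite author's own statement) =====
-- stated objective: alternative
-- what changed: Replaces A's stateful forward scan (current-section accumulator flushed at each header and at the end) with a reverse scan that groups lines into (key, content) blocks in one pass and a second pass assigning the blocks into the default dict.
import Mathlib
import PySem

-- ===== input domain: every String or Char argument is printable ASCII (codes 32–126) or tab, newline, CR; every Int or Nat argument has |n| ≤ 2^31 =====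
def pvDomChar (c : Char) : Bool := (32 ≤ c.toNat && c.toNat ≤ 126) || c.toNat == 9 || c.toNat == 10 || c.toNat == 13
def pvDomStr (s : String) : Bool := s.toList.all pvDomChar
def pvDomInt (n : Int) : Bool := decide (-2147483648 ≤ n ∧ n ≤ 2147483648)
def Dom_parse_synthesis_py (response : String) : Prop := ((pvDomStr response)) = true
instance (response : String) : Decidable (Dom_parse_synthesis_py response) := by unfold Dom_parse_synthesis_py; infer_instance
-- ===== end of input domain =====

-- B replaces A's stateful forward scan with a reverse-scan block grouping plus an assignment pass (alternative decomposition, same cost).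

-- shared lexical helper: the 'for header, key in sections' inner loop of both Pythons —
-- first header the stripped line starts with, together with the stripped remainder
def pvSections : List (String × String) :=
  [("SYNTHESIS:", "synthesis"), ("CONTRADICTIONS:", "contradictions"), ("GAPS:", "gaps"),
   ("CONFIDENCE:", "confidence"), ("FOLLOW_UP_QUESTION:", "follow_up_question")]

def pvFindHeader : List (String × String) → String → Option (String × String)
  | [], _ => none
  | (h, k) :: rest, stripped =>
    if PySem.Str.startswith stripped h then
      some (k, PySem.Str.strip (PySem.Str.slice stripped (some (PySem.Str.len h : Int)) none))
    else pvFindHeader rest stripped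

def pvDefaults : PySem.Dict String String :=
  PySem.Dict.ofList [("synthesis", ""), ("contradictions", "None identified."), ("gaps", ""),
    ("confidence", "MODERATE"), ("follow_up_question", "")]

-- response.split('\n') — exact via Chars.splitOn (separator nonempty)
def pvSplitLines (response : String) : List String :=
  (PySem.Chars.splitOn response.toList ['\n']).map String.ofList

-- ===== PORT A =====
-- 'if current_section: result[current_section] = "\n".join(current_content).strip()'
def pvFlushA (res : PySem.Dict String String) (cur : Option String) (content : List String) :
    PySem.Dict String String :=
  match cur with
  | some k => res.insert k (PySem.Str.strip (PySem.Str.join "\n" content))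
  | none => res

-- the 'for line in response.split('\n')' loop, state = (result, current_section, current_content)
def pvGoA (res : PySem.Dict String String) (cur : Option String) (content : List String) :
    List String → PySem.Dict String String
  | [] => pvFlushA res cur content
  | l :: ls =>
    match pvFindHeader pvSections (PySem.Str.strip l) with
    | some (k, rem) =>
        pvGoA (pvFlushA res cur content) (some k) (if rem = "" then [] else [rem]) ls
    | none =>
        pvGoA res cur (match cur with | some _ => content ++ [l] | none => content) ls

def parse_synthesis_py (response : String) : List (String × String) :=
  (pvGoA pvDefaults none [] (pvSplitLines response)).items

-- ===== PORT B =====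
-- 'for line in reversed(response.split('\n'))': group into (key, content) blocks; returns (blocks, tail)
def pvCollectB : List String → (List (String × List String)) × List String
  | [] => ([], [])
  | l :: ls =>
    let bt := pvCollectB ls
    match pvFindHeader pvSections (PySem.Str.strip l) with
    | some (k, rem) => ((k, (if rem = "" then [] else [rem]) ++ bt.2) :: bt.1, [])
    | none => (bt.1, l :: bt.2)

-- 'for key, content in reversed(blocks): result[key] = "\n".join(content).strip()'
def pvAssignB (res : PySem.Dict String String) (blocks : List (String × List String)) :
    PySem.Dict String String :=
  blocks.foldl (fun r kc => r.insert kc.1 (PySem.Str.strip (PySem.Str.join "\n" kc.2))) res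

def parse_synthesis_py_alt (response : String) : List (String × String) :=
  (pvAssignB pvDefaults (pvCollectB (pvSplitLines response)).1).items

-- ===== PRECONDITION & SPEC =====
def Spec_parse_synthesis_py (response : String) (out : List (String × String)) : Prop := out = parse_synthesis_py_alt response
instance (response : String) (out : List (String × String)) : Decidable (Spec_parse_synthesis_py response out) := by unfold Spec_parse_synthesis_py; infer_instance

-- ===== CLAIM (what is proved, stated in full; the proofs are below) =====
def Claim_equal_parse_synthesis_py : Prop := ∀ (response : String), Dom_parse_synthesis_py response → Spec_parse_synthesis_py response (parse_synthesis_py response)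

-- ===== LEMMAS AND PROOFS =====

-- the loop invariant: A's fold from any state equals flushing the pending content extended by
-- the pre-header tail, then assigning B's blocks
theorem pvGoA_eq (lines : List String) :
    ∀ (res : PySem.Dict String String) (cur : Option String) (content : List String),
      pvGoA res cur content lines =
        pvAssignB (pvFlushA res cur (content ++ (pvCollectB lines).2)) (pvCollectB lines).1 := by
  induction lines with
  | nil =>
    intro res cur content
    simp [pvGoA, pvCollectB, pvAssignB]
  | cons l ls ih =>
    intro res cur content
    cases h : pvFindHeader pvSections (PySem.Str.strip l) with
    | some kr =>
      simp only [pvGoA, pvCollectB, h, ih, pvAssignB, List.foldl, List.append_nil]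
      cases cur <;> simp [pvFlushA]
    | none =>
      cases cur with
      | none =>
        simp only [pvGoA, pvCollectB, h, ih, pvFlushA]
      | some k =>
        simp only [pvGoA, pvCollectB, h, ih, pvFlushA, List.append_assoc, List.cons_append,
          List.nil_append]

-- ===== VERDICT (by name: the statement is the Claim_ definition above) =====
theorem parse_synthesis_py_spec : Claim_equal_parse_synthesis_py := by
  intro response _
  unfold Spec_parse_synthesis_py parse_synthesis_py parse_synthesis_py_alt
  rw [pvGoA_eq]
  simp [pvFlushA]
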